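-- pv_equiv track=rewrite | github.com/MonamiYP/1000 | server.py | sort_deck
-- ===== SOURCE A (Python) =====
-- def sort_deck(deck):
--     s_deck = []
--     c_deck = []
--     d_deck = []
--     h_deck = []
--     new_deck = sorted(deck, key=lambda data: data[2])
--     for i in range(len(deck)):
--         if new_deck[i][1] == 'Spades':
--             s_deck.append(new_deck[i])
--         elif new_deck[i][1] == 'Clubs':
--             c_deck.append(new_deck[i])
--         elif new_deck[i][1] == 'Diamonds':
--             d_deck.append(new_deck[i])
--         elif new_deck[i][1] == 'Hearts':
--             h_deck.append(new_deck[i])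
--     new_deck = s_deck + c_deck + d_deck + h_deck
--     return new_deck
-- ===== SOURCE B (Python) =====
-- def sort_deck(deck):
--     suit_order = {'Spades': 0, 'Clubs': 1, 'Diamonds': 2, 'Hearts': 3}
--     filtered = [card for card in deck if card[1] in suit_order]
--     return sorted(filtered, key=lambda card: (suit_order[card[1]], card[2]))
-- ===== Notes on version B (the rewrite author's own statement) =====
-- stated objective: idiomatic
-- what changed: A sorts by value and then distributes the cards into four explicit suit bucket lists via an index loop over range(len(deck)) before concatenating them; B filters to the recognised suits and does one stable sort on the composite key (suit rank, value) taken from a suit-order dict.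
-- outside the precondition, e.g. on sort_deck([['A'], ['K', 'Hearts', '2']]): A raises IndexError, B raises IndexError
import Mathlib
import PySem

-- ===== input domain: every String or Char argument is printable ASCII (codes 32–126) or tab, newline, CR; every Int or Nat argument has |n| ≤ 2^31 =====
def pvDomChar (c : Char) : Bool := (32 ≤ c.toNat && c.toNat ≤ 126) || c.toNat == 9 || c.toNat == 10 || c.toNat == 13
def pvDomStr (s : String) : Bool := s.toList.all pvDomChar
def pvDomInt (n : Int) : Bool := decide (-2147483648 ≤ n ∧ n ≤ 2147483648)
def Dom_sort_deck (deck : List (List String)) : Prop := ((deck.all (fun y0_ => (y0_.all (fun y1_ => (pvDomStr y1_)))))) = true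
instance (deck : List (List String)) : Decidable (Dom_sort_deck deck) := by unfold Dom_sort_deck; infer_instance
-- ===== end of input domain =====

-- B replaces A's sort-by-value + four explicit suit buckets with one stable sort on the
-- composite key (suit rank, value) over the cards whose suit is recognised (objective: idiomatic).

-- ===== PORT A =====
-- card[2] and card[1] (always in range under Pre_)
def pvVal (c : List String) : String := PySem.List.pyGetD c 2 ""
def pvSuit (c : List String) : String := PySem.List.pyGetD c 1 ""

-- the body of A's for-loop: append new_deck[i] to the bucket its suit selects
def pvStepA (st : List (List String) × List (List String) × List (List String) × List (List String))
    (card : List String) :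
    List (List String) × List (List String) × List (List String) × List (List String) :=
  if pvSuit card = "Spades" then (st.1 ++ [card], st.2.1, st.2.2.1, st.2.2.2)
  else if pvSuit card = "Clubs" then (st.1, st.2.1 ++ [card], st.2.2.1, st.2.2.2)
  else if pvSuit card = "Diamonds" then (st.1, st.2.1, st.2.2.1 ++ [card], st.2.2.2)
  else if pvSuit card = "Hearts" then (st.1, st.2.1, st.2.2.1, st.2.2.2 ++ [card])
  else st

def sort_deck (deck : List (List String)) : List (List String) :=
  let new_deck := PySem.List.sorted deck (fun data => pvVal data)
  let st := (PySem.List.pyRange 0 (PySem.List.len deck)).foldl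
    (fun st i => pvStepA st (PySem.List.pyGetD new_deck i [])) ([], [], [], [])
  st.1 ++ st.2.1 ++ st.2.2.1 ++ st.2.2.2

-- ===== PORT B =====
def pvSuitOrder : PySem.Dict String Int :=
  ⟨[("Spades", 0), ("Clubs", 1), ("Diamonds", 2), ("Hearts", 3)]⟩

-- card[1] in suit_order
def pvKnown (c : List String) : Bool := (PySem.Dict.get? pvSuitOrder (pvSuit c)).isSome
-- suit_order[card[1]] (key always present on filtered cards)
def pvIdx (c : List String) : Int := (PySem.Dict.get? pvSuitOrder (pvSuit c)).getD 0

def sort_deck_alt (deck : List (List String)) : List (List String) :=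
  let filtered := deck.filter (fun card => pvKnown card)
  PySem.List.sorted2 filtered (fun card => pvIdx card) (fun card => pvVal card)

-- ===== PRECONDITION & SPEC =====
-- Pre_ excludes decks containing a card of fewer than 3 fields: there A's sort key
-- data[2] (or the suit test card[1]) raises IndexError.
def Pre_sort_deck (deck : List (List String)) : Prop := ∀ c ∈ deck, 3 ≤ c.length
instance (deck : List (List String)) : Decidable (Pre_sort_deck deck) := by
  unfold Pre_sort_deck; infer_instance

def pvWitness_sort_deck : List (List String) :=
  [["A", "Spades", "5"], ["K", "Hearts", "2"], ["Q", "Joker", "3"]]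

def Spec_sort_deck (deck : List (List String)) (out : List (List String)) : Prop := out = sort_deck_alt deck
instance (deck : List (List String)) (out : List (List String)) : Decidable (Spec_sort_deck deck out) := by unfold Spec_sort_deck; infer_instance

-- ===== CLAIM (what is proved, stated in full; the proofs are below) =====
def Claim_equal_sort_deck : Prop := ∀ (deck : List (List String)), Dom_sort_deck deck → Pre_sort_deck deck → Spec_sort_deck deck (sort_deck deck)

-- ===== LEMMAS AND PROOFS =====

-- the comparison sorted2 uses (Python's lexicographic tuple key (pvIdx, pvVal))
def pvLexB (a b : List String) : Bool :=
  decide (pvIdx a < pvIdx b) || !decide (pvIdx b < pvIdx a) && decide (pvVal a < pvVal b)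

-- the comparison A's sorted uses (key pvVal)
def pvValB (a b : List String) : Bool := decide (pvVal a < pvVal b)

theorem pvBeq_eq (a b : String) : (a == b) = decide (b = a) := by
  by_cases h : b = a
  · simp [h]
  · simp only [decide_eq_false h, beq_eq_false_iff_ne, Ne]
    exact fun hc => h hc.symm

theorem pvKnown_iff (c : List String) :
    pvKnown c = true ↔ pvSuit c = "Spades" ∨ pvSuit c = "Clubs" ∨ pvSuit c = "Diamonds" ∨ pvSuit c = "Hearts" := by
  by_cases h1 : pvSuit c = "Spades" <;>
  by_cases h2 : pvSuit c = "Clubs" <;>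
  by_cases h3 : pvSuit c = "Diamonds" <;>
  by_cases h4 : pvSuit c = "Hearts" <;>
  simp [pvKnown, pvSuitOrder, PySem.Dict.get?, List.find?, pvBeq_eq, h1, h2, h3, h4]

theorem pvIdx_spades {c : List String} (h : pvSuit c = "Spades") : pvIdx c = 0 := by
  simp [pvIdx, h, pvSuitOrder, PySem.Dict.get?]
theorem pvIdx_clubs {c : List String} (h : pvSuit c = "Clubs") : pvIdx c = 1 := by
  simp [pvIdx, h, pvSuitOrder, PySem.Dict.get?]
theorem pvIdx_diamonds {c : List String} (h : pvSuit c = "Diamonds") : pvIdx c = 2 := by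
  simp [pvIdx, h, pvSuitOrder, PySem.Dict.get?]
theorem pvIdx_hearts {c : List String} (h : pvSuit c = "Hearts") : pvIdx c = 3 := by
  simp [pvIdx, h, pvSuitOrder, PySem.Dict.get?]

-- A's loop computes the four suit filters of its input, in order
theorem pvBuckets (l : List (List String)) (a b c d : List (List String)) :
    l.foldl pvStepA (a, b, c, d) =
      (a ++ l.filter (fun x => decide (pvSuit x = "Spades")),
       b ++ l.filter (fun x => decide (pvSuit x = "Clubs")),
       c ++ l.filter (fun x => decide (pvSuit x = "Diamonds")),
       d ++ l.filter (fun x => decide (pvSuit x = "Hearts"))) := by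
  induction l generalizing a b c d with
  | nil => simp
  | cons x t ih =>
    simp only [List.foldl_cons]
    by_cases h1 : pvSuit x = "Spades"
    · rw [show pvStepA (a, b, c, d) x = (a ++ [x], b, c, d) by simp [pvStepA, h1], ih]
      simp [h1]
    · by_cases h2 : pvSuit x = "Clubs"
      · rw [show pvStepA (a, b, c, d) x = (a, b ++ [x], c, d) by simp [pvStepA, h2], ih]
        simp [h2]
      · by_cases h3 : pvSuit x = "Diamonds"
        · rw [show pvStepA (a, b, c, d) x = (a, b, c ++ [x], d) by simp [pvStepA, h3], ih]
          simp [h3]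
        · by_cases h4 : pvSuit x = "Hearts"
          · rw [show pvStepA (a, b, c, d) x = (a, b, c, d ++ [x]) by simp [pvStepA, h4], ih]
            simp [h4]
          · rw [show pvStepA (a, b, c, d) x = (a, b, c, d) by simp [pvStepA, h1, h2, h3, h4], ih]
            simp [h1, h2, h3, h4]

-- insertBy facts -------------------------------------------------------------

theorem pv_insertBy_all_before {α : Type} (before : α → α → Bool) (x : α) (m : List α)
    (h : ∀ z ∈ m, before x z = true) :
    PySem.List.insertBy before x m = x :: m := by
  cases m with
  | nil => rfl
  | cons y ys => simp [PySem.List.insertBy, h y (by simp)]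

theorem pv_insertBy_append_left {α : Type} (before : α → α → Bool) (x : α) (l r : List α)
    (h : ∀ b ∈ l, before x b = false) :
    PySem.List.insertBy before x (l ++ r) = l ++ PySem.List.insertBy before x r := by
  induction l with
  | nil => rfl
  | cons y ys ih =>
    have hy : before x y = false := h y (by simp)
    simp [PySem.List.insertBy, hy]
    exact ih (fun b hb => h b (by simp [hb]))

theorem pv_insertBy_append_right {α : Type} (before : α → α → Bool) (x : α) (l r : List α)
    (h : ∀ b ∈ r, before x b = true) :
    PySem.List.insertBy before x (l ++ r) = PySem.List.insertBy before x l ++ r := by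
  induction l with
  | nil => simp [pv_insertBy_all_before before x r h, PySem.List.insertBy]
  | cons y ys ih =>
    by_cases hy : before x y = true <;> simp [PySem.List.insertBy, hy, ih]

theorem pv_insertBy_congr {α : Type} (before before' : α → α → Bool) (x : α) (l : List α)
    (h : ∀ b ∈ l, before x b = before' x b) :
    PySem.List.insertBy before x l = PySem.List.insertBy before' x l := by
  induction l with
  | nil => rfl
  | cons y ys ih =>
    have hy := h y (by simp)
    by_cases hb : before x y = true <;>
      simp [PySem.List.insertBy, hb, hy ▸ hb, ih (fun b hb' => h b (by simp [hb']))]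

theorem pv_filter_insertBy_neg {α : Type} (before : α → α → Bool) (p : α → Bool) (x : α)
    (l : List α) (hx : p x = false) :
    (PySem.List.insertBy before x l).filter p = l.filter p := by
  induction l with
  | nil => simp [PySem.List.insertBy, hx]
  | cons y ys ih =>
    by_cases hb : before x y = true <;> simp [PySem.List.insertBy, hb, hx, List.filter_cons, ih]

theorem pv_filter_insertBy_pos {α κ : Type} [LinearOrder κ] (key : α → κ) (p : α → Bool) (x : α)
    (l : List α) (hx : p x = true) (hs : l.Pairwise (fun a b => key a ≤ key b)) :
    (PySem.List.insertBy (fun a b => decide (key a < key b)) x l).filter p =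
      PySem.List.insertBy (fun a b => decide (key a < key b)) x (l.filter p) := by
  induction l with
  | nil => simp [PySem.List.insertBy, hx]
  | cons y ys ih =>
    have hpair := List.pairwise_cons.mp hs
    by_cases hb : key x < key y
    · -- x goes in front; every later element also has key x < key
      have h1 : PySem.List.insertBy (fun a b => decide (key a < key b)) x (y :: ys) = x :: y :: ys := by
        simp [PySem.List.insertBy, hb]
      rw [h1]
      by_cases hp : p y = true
      · simp [hx, hp, PySem.List.insertBy, hb]
      · simp only [List.filter_cons, hx, hp]
        simp only [Bool.false_eq_true, if_false]
        exact (pv_insertBy_all_before _ x _ (fun z hz => by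
          have hz' : z ∈ ys := List.mem_of_mem_filter hz
          have := hpair.1 z hz'
          simp [lt_of_lt_of_le hb this])).symm
    · have h1 : PySem.List.insertBy (fun a b => decide (key a < key b)) x (y :: ys) =
          y :: PySem.List.insertBy (fun a b => decide (key a < key b)) x ys := by
        simp [PySem.List.insertBy, hb]
      rw [h1]
      by_cases hp : p y = true
      · rw [show List.filter p (y :: ys) = y :: List.filter p ys by simp [hp],
            show PySem.List.insertBy (fun a b => decide (key a < key b)) x (y :: List.filter p ys) =
              y :: PySem.List.insertBy (fun a b => decide (key a < key b)) x (List.filter p ys) by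
                simp [PySem.List.insertBy, hb]]
        simp [hp, ih hpair.2]
      · simp [hp, ih hpair.2]

-- append-singleton forms of the two sorts
theorem pv_sorted_snoc {α κ : Type} [LinearOrder κ] (xs : List α) (x : α) (key : α → κ) :
    PySem.List.sorted (xs ++ [x]) key =
      PySem.List.insertBy (fun a b => decide (key a < key b)) x (PySem.List.sorted xs key) := by
  rw [PySem.List.sorted_eq_foldl_insertBy, PySem.List.sorted_eq_foldl_insertBy, List.foldl_append]
  rfl

theorem pv_sorted2_snoc (xs : List (List String)) (x : List String) :
    PySem.List.sorted2 (xs ++ [x]) (fun c => pvIdx c) (fun c => pvVal c) =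
      PySem.List.insertBy pvLexB x (PySem.List.sorted2 xs (fun c => pvIdx c) (fun c => pvVal c)) := by
  simp only [PySem.List.sorted2, List.foldl_append, List.foldl_cons, List.foldl_nil]
  rfl

-- bucket-membership: an element of a suit filter of the sorted deck has that suit
theorem pv_mem_bucket {l : List (List String)} {b : List String} {n : String}
    (h : b ∈ l.filter (fun x => decide (pvSuit x = n))) : pvSuit b = n := by
  have := (List.mem_filter.mp h).2
  exact of_decide_eq_true this

-- comparison values of the sorted2 `before` against bucket elements
theorem pvLexB_lt {x b : List String} (h : pvIdx b < pvIdx x) : pvLexB x b = false := by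
  simp [pvLexB, h, not_lt_of_gt h]

theorem pvLexB_gt {x b : List String} (h : pvIdx x < pvIdx b) : pvLexB x b = true := by
  simp [pvLexB, h]

theorem pvLexB_eqIdx {x b : List String} (h : pvIdx x = pvIdx b) :
    pvLexB x b = decide (pvVal x < pvVal b) := by
  simp [pvLexB, h]

-- THE MAIN INVARIANT: sorting the recognised cards by (suit rank, value) equals
-- sorting everything by value and concatenating the four suit filters.
theorem pvMain (xs : List (List String)) :
    PySem.List.sorted2 (xs.filter (fun c => pvKnown c)) (fun c => pvIdx c) (fun c => pvVal c) =
      (PySem.List.sorted xs (fun c => pvVal c)).filter (fun c => decide (pvSuit c = "Spades")) ++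
      (PySem.List.sorted xs (fun c => pvVal c)).filter (fun c => decide (pvSuit c = "Clubs")) ++
      (PySem.List.sorted xs (fun c => pvVal c)).filter (fun c => decide (pvSuit c = "Diamonds")) ++
      (PySem.List.sorted xs (fun c => pvVal c)).filter (fun c => decide (pvSuit c = "Hearts")) := by
  induction xs using List.reverseRecOn with
  | nil => rfl
  | append_singleton xs x ih =>
    set S := PySem.List.sorted xs (fun c => pvVal c) with hSdef
    have hs : S.Pairwise (fun a b => pvVal a ≤ pvVal b) :=
      PySem.List.sorted_pairwise xs (fun c => pvVal c)
    have mS : ∀ b ∈ S.filter (fun c => decide (pvSuit c = "Spades")), pvIdx b = 0 :=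
      fun b hb => pvIdx_spades (pv_mem_bucket hb)
    have mC : ∀ b ∈ S.filter (fun c => decide (pvSuit c = "Clubs")), pvIdx b = 1 :=
      fun b hb => pvIdx_clubs (pv_mem_bucket hb)
    have mD : ∀ b ∈ S.filter (fun c => decide (pvSuit c = "Diamonds")), pvIdx b = 2 :=
      fun b hb => pvIdx_diamonds (pv_mem_bucket hb)
    have mH : ∀ b ∈ S.filter (fun c => decide (pvSuit c = "Hearts")), pvIdx b = 3 :=
      fun b hb => pvIdx_hearts (pv_mem_bucket hb)
    rw [List.filter_append, pv_sorted_snoc]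
    by_cases hk : pvKnown x = true
    · rw [show List.filter (fun c => pvKnown c) [x] = [x] by simp [hk], pv_sorted2_snoc, ih]
      rcases (pvKnown_iff x).mp hk with h | h | h | h
      · -- Spades: x is inserted into the first bucket
        have hi : pvIdx x = 0 := pvIdx_spades h
        rw [pv_filter_insertBy_pos (fun c => pvVal c) (fun c => decide (pvSuit c = "Spades")) x S (by simp [h]) hs,
            pv_filter_insertBy_neg _ (fun c => decide (pvSuit c = "Clubs")) x S (by simp [h]),
            pv_filter_insertBy_neg _ (fun c => decide (pvSuit c = "Diamonds")) x S (by simp [h]),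
            pv_filter_insertBy_neg _ (fun c => decide (pvSuit c = "Hearts")) x S (by simp [h])]
        simp only [List.append_assoc]
        rw [pv_insertBy_append_right pvLexB x (S.filter (fun c => decide (pvSuit c = "Spades"))) _
              (by intro b hb
                  rcases List.mem_append.mp hb with hb | hb
                  · exact pvLexB_gt (by rw [hi, mC b hb]; norm_num)
                  rcases List.mem_append.mp hb with hb | hb
                  · exact pvLexB_gt (by rw [hi, mD b hb]; norm_num)
                  · exact pvLexB_gt (by rw [hi, mH b hb]; norm_num)),
            pv_insertBy_congr pvLexB (fun a b => decide (pvVal a < pvVal b)) x _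
              (fun b hb => pvLexB_eqIdx (by rw [hi, mS b hb]))]
      · -- Clubs
        have hi : pvIdx x = 1 := pvIdx_clubs h
        rw [pv_filter_insertBy_neg _ (fun c => decide (pvSuit c = "Spades")) x S (by simp [h]),
            pv_filter_insertBy_pos (fun c => pvVal c) (fun c => decide (pvSuit c = "Clubs")) x S (by simp [h]) hs,
            pv_filter_insertBy_neg _ (fun c => decide (pvSuit c = "Diamonds")) x S (by simp [h]),
            pv_filter_insertBy_neg _ (fun c => decide (pvSuit c = "Hearts")) x S (by simp [h])]
        simp only [List.append_assoc]
        rw [pv_insertBy_append_left pvLexB x (S.filter (fun c => decide (pvSuit c = "Spades"))) _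
              (fun b hb => pvLexB_lt (by rw [hi, mS b hb]; norm_num)),
            pv_insertBy_append_right pvLexB x (S.filter (fun c => decide (pvSuit c = "Clubs"))) _
              (by intro b hb
                  rcases List.mem_append.mp hb with hb | hb
                  · exact pvLexB_gt (by rw [hi, mD b hb]; norm_num)
                  · exact pvLexB_gt (by rw [hi, mH b hb]; norm_num)),
            pv_insertBy_congr pvLexB (fun a b => decide (pvVal a < pvVal b)) x _
              (fun b hb => pvLexB_eqIdx (by rw [hi, mC b hb]))]
      · -- Diamonds
        have hi : pvIdx x = 2 := pvIdx_diamonds h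
        rw [pv_filter_insertBy_neg _ (fun c => decide (pvSuit c = "Spades")) x S (by simp [h]),
            pv_filter_insertBy_neg _ (fun c => decide (pvSuit c = "Clubs")) x S (by simp [h]),
            pv_filter_insertBy_pos (fun c => pvVal c) (fun c => decide (pvSuit c = "Diamonds")) x S (by simp [h]) hs,
            pv_filter_insertBy_neg _ (fun c => decide (pvSuit c = "Hearts")) x S (by simp [h])]
        simp only [List.append_assoc]
        rw [pv_insertBy_append_left pvLexB x (S.filter (fun c => decide (pvSuit c = "Spades"))) _
              (fun b hb => pvLexB_lt (by rw [hi, mS b hb]; norm_num)),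
            pv_insertBy_append_left pvLexB x (S.filter (fun c => decide (pvSuit c = "Clubs"))) _
              (fun b hb => pvLexB_lt (by rw [hi, mC b hb]; norm_num)),
            pv_insertBy_append_right pvLexB x (S.filter (fun c => decide (pvSuit c = "Diamonds"))) _
              (fun b hb => pvLexB_gt (by rw [hi, mH b hb]; norm_num)),
            pv_insertBy_congr pvLexB (fun a b => decide (pvVal a < pvVal b)) x _
              (fun b hb => pvLexB_eqIdx (by rw [hi, mD b hb]))]
      · -- Hearts: x goes to the last bucket
        have hi : pvIdx x = 3 := pvIdx_hearts h
        rw [pv_filter_insertBy_neg _ (fun c => decide (pvSuit c = "Spades")) x S (by simp [h]),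
            pv_filter_insertBy_neg _ (fun c => decide (pvSuit c = "Clubs")) x S (by simp [h]),
            pv_filter_insertBy_neg _ (fun c => decide (pvSuit c = "Diamonds")) x S (by simp [h]),
            pv_filter_insertBy_pos (fun c => pvVal c) (fun c => decide (pvSuit c = "Hearts")) x S (by simp [h]) hs]
        simp only [List.append_assoc]
        rw [pv_insertBy_append_left pvLexB x (S.filter (fun c => decide (pvSuit c = "Spades"))) _
              (fun b hb => pvLexB_lt (by rw [hi, mS b hb]; norm_num)),
            pv_insertBy_append_left pvLexB x (S.filter (fun c => decide (pvSuit c = "Clubs"))) _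
              (fun b hb => pvLexB_lt (by rw [hi, mC b hb]; norm_num)),
            pv_insertBy_append_left pvLexB x (S.filter (fun c => decide (pvSuit c = "Diamonds"))) _
              (fun b hb => pvLexB_lt (by rw [hi, mD b hb]; norm_num)),
            pv_insertBy_congr pvLexB (fun a b => decide (pvVal a < pvVal b)) x _
              (fun b hb => pvLexB_eqIdx (by rw [hi, mH b hb]))]
    · have hnone : ∀ n : String, (decide (pvSuit x = n)) = true → pvKnown x = true → False := by
        intro n hn hk'; exact absurd hk' (by simp [hk])
      have hns : ∀ n, n = "Spades" ∨ n = "Clubs" ∨ n = "Diamonds" ∨ n = "Hearts" →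
          (decide (pvSuit x = n)) = false := by
        intro n hn
        by_contra hc
        have hx : pvSuit x = n := of_decide_eq_true (by revert hc; cases decide (pvSuit x = n) <;> simp)
        exact absurd ((pvKnown_iff x).mpr (by rcases hn with h|h|h|h <;> simp [hx, h])) (by simp [hk])
      rw [show List.filter (fun c => pvKnown c) [x] = [] by simp [hk], List.append_nil,
          pv_filter_insertBy_neg _ (fun c => decide (pvSuit c = "Spades")) x S (hns _ (by tauto)),
          pv_filter_insertBy_neg _ (fun c => decide (pvSuit c = "Clubs")) x S (hns _ (by tauto)),
          pv_filter_insertBy_neg _ (fun c => decide (pvSuit c = "Diamonds")) x S (hns _ (by tauto)),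
          pv_filter_insertBy_neg _ (fun c => decide (pvSuit c = "Hearts")) x S (hns _ (by tauto))]
      exact ih

-- ===== VERDICT (by name: the statement is the Claim_ definition above) =====
theorem sort_deck_spec : Claim_equal_sort_deck := by
  intro deck _ _
  unfold Spec_sort_deck sort_deck sort_deck_alt
  dsimp only
  have hlen : PySem.List.len deck = PySem.List.len (PySem.List.sorted deck (fun data => pvVal data)) := by
    simp [PySem.List.len, PySem.List.length_sorted]
  rw [hlen, PySem.List.foldl_pyRange_zero_pyGetD (PySem.List.sorted deck (fun data => pvVal data)) [] pvStepA ([], [], [], []),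
      pvBuckets]
  simp only [List.nil_append]
  rw [pvMain]
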